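-- pv_equiv track=rewrite | github.com/ArcticCoderGuy/Mikrobot-FastVersion | PARETO_ANALYSIS_FRAMEWORK.py | _classify_journal_failure
-- ===== SOURCE A (Python) =====
-- from enum import Enum
--
-- class FailureCategory(Enum):
--     """Primary failure categories based on trading system analysis"""
--     EXECUTION_FAILURES = "execution_failures"
--     SIGNAL_FAILURES = "signal_failures"
--     CONNECTION_ISSUES = "connection_issues"
--     TIMING_ISSUES = "timing_issues"
--     DATA_QUALITY_ISSUES = "data_quality"
--     RISK_MANAGEMENT_FAILURES = "risk_management"
--     PLATFORM_ISSUES = "platform_issues"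
--
-- def _classify_journal_failure(event_type: str, message: str) -> str:
--     """Classify journal failures by category"""
--     message_lower = message.lower() if message else ""
--
--     if any(word in message_lower for word in ['connection', 'disconnect', 'network', 'server']):
--         return FailureCategory.CONNECTION_ISSUES.value
--     elif any(word in message_lower for word in ['execution', 'order', 'trade', 'position']):
--         return FailureCategory.EXECUTION_FAILURES.value
--     elif any(word in message_lower for word in ['data', 'price', 'tick', 'quote']):
--         return FailureCategory.DATA_QUALITY_ISSUES.value
--     elif any(word in message_lower for word in ['timeout', 'delay', 'slow']):
--         return FailureCategory.TIMING_ISSUES.value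
--     else:
--         return FailureCategory.PLATFORM_ISSUES.value
-- ===== SOURCE B (Python) =====
-- from enum import Enum
--
-- class FailureCategory(Enum):
--     EXECUTION_FAILURES = "execution_failures"
--     SIGNAL_FAILURES = "signal_failures"
--     CONNECTION_ISSUES = "connection_issues"
--     TIMING_ISSUES = "timing_issues"
--     DATA_QUALITY_ISSUES = "data_quality"
--     RISK_MANAGEMENT_FAILURES = "risk_management"
--     PLATFORM_ISSUES = "platform_issues"
--
-- # flat keyword -> priority rank (lower rank = higher priority)
-- _KEYWORD_RANK = [
--     ('connection', 0), ('disconnect', 0), ('network', 0), ('server', 0),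
--     ('execution', 1), ('order', 1), ('trade', 1), ('position', 1),
--     ('data', 2), ('price', 2), ('tick', 2), ('quote', 2),
--     ('timeout', 3), ('delay', 3), ('slow', 3),
-- ]
--
-- _CATEGORY_BY_RANK = [
--     FailureCategory.CONNECTION_ISSUES,
--     FailureCategory.EXECUTION_FAILURES,
--     FailureCategory.DATA_QUALITY_ISSUES,
--     FailureCategory.TIMING_ISSUES,
--     FailureCategory.PLATFORM_ISSUES,
-- ]
--
-- def _classify_journal_failure(event_type: str, message: str) -> str:
--     """Classify journal failures: one pass over all keywords keeping the
--     best (minimum) priority rank among those that occur, then index into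
--     the category table (rank 4 = no match = platform issues)."""
--     message_lower = message.lower() if message else ""
--     best = 4
--     for word, rank in _KEYWORD_RANK:
--         if word in message_lower:
--             best = min(best, rank)
--     return _CATEGORY_BY_RANK[best].value
-- ===== Notes on version B (the rewrite author's own statement) =====
-- stated objective: alternative
-- what changed: Replaces the ordered if/elif group checks (with early return at the first matching group) by a single flat pass over all 15 keywords that accumulates the minimum priority rank of any matching keyword and indexes a rank->category table at the end.
import Mathlib
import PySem

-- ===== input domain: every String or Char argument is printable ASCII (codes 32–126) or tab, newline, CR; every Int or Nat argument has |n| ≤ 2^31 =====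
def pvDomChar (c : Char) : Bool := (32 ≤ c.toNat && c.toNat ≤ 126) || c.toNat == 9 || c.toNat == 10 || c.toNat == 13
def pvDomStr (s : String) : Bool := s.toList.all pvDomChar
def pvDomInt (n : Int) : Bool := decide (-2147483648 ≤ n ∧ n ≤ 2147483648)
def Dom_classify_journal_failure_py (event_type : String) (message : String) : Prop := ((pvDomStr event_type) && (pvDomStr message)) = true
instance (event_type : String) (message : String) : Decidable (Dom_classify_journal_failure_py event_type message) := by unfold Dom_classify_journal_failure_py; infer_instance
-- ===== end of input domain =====

-- B replaces A's ordered if/elif group checks by one flat pass over all keywords that keeps the minimum priority rank of any match and indexes a rank→category table (alternative decomposition, same cost).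

-- ===== PORT A =====
-- Port of A: the literal if/elif chain over the four keyword groups.
def classify_journal_failure_py (_event_type : String) (message : String) : String :=
  let message_lower := if message ≠ "" then PySem.Str.lower message else ""
  if ["connection", "disconnect", "network", "server"].any (fun word => PySem.Str.isIn word message_lower) then
    "connection_issues"
  else if ["execution", "order", "trade", "position"].any (fun word => PySem.Str.isIn word message_lower) then
    "execution_failures"
  else if ["data", "price", "tick", "quote"].any (fun word => PySem.Str.isIn word message_lower) then
    "data_quality"
  else if ["timeout", "delay", "slow"].any (fun word => PySem.Str.isIn word message_lower) then
    "timing_issues"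
  else
    "platform_issues"

-- ===== PORT B =====
-- Port of B: flat keyword → rank list, min-rank accumulator, rank → category table.
def pvKeywordRank : List (String × Nat) :=
  [ ("connection", 0), ("disconnect", 0), ("network", 0), ("server", 0),
    ("execution", 1), ("order", 1), ("trade", 1), ("position", 1),
    ("data", 2), ("price", 2), ("tick", 2), ("quote", 2),
    ("timeout", 3), ("delay", 3), ("slow", 3) ]

def pvCategoryByRank : List String :=
  ["connection_issues", "execution_failures", "data_quality", "timing_issues", "platform_issues"]

def classify_journal_failure_py_alt (_event_type : String) (message : String) : String :=
  let message_lower := if message ≠ "" then PySem.Str.lower message else ""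
  let best := pvKeywordRank.foldl
    (fun b p => if PySem.Str.isIn p.1 message_lower then min b p.2 else b) 4
  -- _CATEGORY_BY_RANK[best]: best ≤ 4 always, so Python indexing never raises
  pvCategoryByRank.getD best "platform_issues"

-- ===== PRECONDITION & SPEC =====
def Spec_classify_journal_failure_py (event_type : String) (message : String) (out : String) : Prop := out = classify_journal_failure_py_alt event_type message
instance (event_type : String) (message : String) (out : String) : Decidable (Spec_classify_journal_failure_py event_type message out) := by unfold Spec_classify_journal_failure_py; infer_instance

-- ===== CLAIM =====
def Claim_equal_classify_journal_failure_py : Prop := ∀ (event_type : String) (message : String), Dom_classify_journal_failure_py event_type message → Spec_classify_journal_failure_py event_type message (classify_journal_failure_py event_type message)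

-- ===== LEMMAS AND PROOFS =====
-- folding one keyword group (all with rank r) updates the accumulator to min b r iff some keyword matches
theorem pv_fold_group (m : String) (r : Nat) (ks : List String) (b : Nat) :
    (ks.map (fun k => (k, r))).foldl
      (fun b p => if PySem.Str.isIn p.1 m then min b p.2 else b) b
    = if ks.any (fun k => PySem.Str.isIn k m) then min b r else b := by
  induction ks generalizing b with
  | nil => simp
  | cons k t ih =>
    rw [List.map_cons, List.foldl_cons, List.any_cons]
    by_cases h : PySem.Str.isIn k m = true
    · rw [if_pos h, ih, h, Bool.true_or, if_pos rfl]
      split_ifs <;> omega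
    · have h' : PySem.Str.isIn k m = false := by
        cases hb : PySem.Str.isIn k m
        · rfl
        · exact absurd hb h
      rw [if_neg h, ih, h', Bool.false_or]

-- ===== VERDICT =====
theorem classify_journal_failure_py_spec : Claim_equal_classify_journal_failure_py := by
  intro event_type message _
  unfold Spec_classify_journal_failure_py classify_journal_failure_py
    classify_journal_failure_py_alt
  have hsplit : pvKeywordRank =
      (["connection", "disconnect", "network", "server"].map (fun k => (k, 0)))
      ++ (["execution", "order", "trade", "position"].map (fun k => (k, 1)))
      ++ (["data", "price", "tick", "quote"].map (fun k => (k, 2)))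
      ++ (["timeout", "delay", "slow"].map (fun k => (k, 3))) := by rfl
  set m := if message ≠ "" then PySem.Str.lower message else "" with hm
  rw [hsplit]
  simp only [List.foldl_append, pv_fold_group]
  split_ifs <;> rfl
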